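-- pv_equiv track=rewrite | github.com/KatFaye/dbhw4 | prob1/csvgen.py | toCSVLine
-- ===== SOURCE A (Python) =====
-- def toCSVLine(el, pos):
--     for p in pos:
--         el = el[:p] + ',' + el[p:]
--     temp = el.split(',')
--     final = ""
--     for e in temp:
--         final += " ".join(e.split())
--         final += ","
--     return final
-- ===== SOURCE B (Python) =====
-- def toCSVLine(el, pos):
--     chars = list(el)
--     for p in pos:
--         chars.insert(p, ',')
--     out = []
--     started = False
--     pending = False
--     for c in chars:
--         if c == ',':
--             out.append(',')
--             started = False
--             pending = False
--         elif c.isspace():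
--             if started:
--                 pending = True
--         else:
--             if pending:
--                 out.append(' ')
--                 pending = False
--             out.append(c)
--             started = True
--     out.append(',')
--     return ''.join(out)
-- ===== Notes on version B (the rewrite author's own statement) =====
-- stated objective: alternative
-- what changed: B mutates a char list with list.insert instead of rebuilding the string by slice+concat for every position, and replaces A's split-on-comma / per-field split-and-join pipeline by a single-pass state machine that collapses whitespace runs and emits the commas inline.
import Mathlib
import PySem

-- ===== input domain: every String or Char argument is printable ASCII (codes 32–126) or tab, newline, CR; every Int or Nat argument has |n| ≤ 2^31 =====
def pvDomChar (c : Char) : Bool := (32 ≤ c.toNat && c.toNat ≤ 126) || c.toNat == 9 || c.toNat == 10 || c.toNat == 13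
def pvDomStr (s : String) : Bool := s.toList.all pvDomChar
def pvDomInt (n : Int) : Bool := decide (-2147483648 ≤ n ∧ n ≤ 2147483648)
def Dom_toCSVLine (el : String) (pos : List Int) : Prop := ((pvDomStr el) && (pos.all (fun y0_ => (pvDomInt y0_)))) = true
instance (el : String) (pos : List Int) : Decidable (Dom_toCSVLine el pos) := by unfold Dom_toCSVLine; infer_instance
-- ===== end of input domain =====

-- B mutates a char list in place and normalizes whitespace in one scan instead of
-- rebuilding the string per position and split/join-ing per field; an alternative of
-- similar cost, proved to return the same string.


-- ===== PORT A =====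
-- el = el[:p] + ',' + el[p:]
def pvAStep (s : List Char) (p : Int) : List Char :=
  PySem.List.slice s none (some p) ++ [','] ++ PySem.List.slice s (some p) none

-- for e in temp: final += " ".join(e.split()); final += ","
def pvNormJoin (temp : List (List Char)) : List Char :=
  temp.foldl (fun acc e => acc ++ PySem.Chars.join [' '] (PySem.Chars.split₀ e) ++ [',']) []

def toCSVLine (el : String) (pos : List Int) : String :=
  let el' := pos.foldl pvAStep el.toList
  String.mk (pvNormJoin (PySem.Chars.splitOn el' [',']))

-- ===== PORT B =====
-- one iteration of B's scan over the characters; state = (out, started, pending)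
def pvBStep (st : List Char × Bool × Bool) (c : Char) : List Char × Bool × Bool :=
  if c = ',' then (st.1 ++ [','], false, false)
  else if PySem.Chars.isspace c then (st.1, st.2.1, st.2.2 || st.2.1)
  else ((if st.2.2 then st.1 ++ [' '] else st.1) ++ [c], true, false)

def toCSVLine_alt (el : String) (pos : List Int) : String :=
  let chars := pos.foldl (fun s p => PySem.List.insert s p ',') el.toList
  let r := chars.foldl pvBStep ([], false, false)
  String.mk (r.1 ++ [','])

-- ===== PRECONDITION & SPEC =====
def Spec_toCSVLine (el : String) (pos : List Int) (out : String) : Prop := out = toCSVLine_alt el pos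
instance (el : String) (pos : List Int) (out : String) : Decidable (Spec_toCSVLine el pos out) := by unfold Spec_toCSVLine; infer_instance

-- ===== CLAIM (what is proved, stated in full; the proofs are below) =====
def Claim_equal_toCSVLine : Prop := ∀ (el : String) (pos : List Int), Dom_toCSVLine el pos → Spec_toCSVLine el pos (toCSVLine el pos)

-- ===== LEMMAS AND PROOFS =====

-- A's slice-and-concat step IS Python's list.insert of ',' (B's loop body)
lemma pvAStep_eq_insert (s : List Char) (p : Int) : pvAStep s p = PySem.List.insert s p ',' := by
  unfold pvAStep PySem.List.insert PySem.List.slice PySem.List.sliceIndices PySem.List.clampIdx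
  have h10 : ¬ ((1:Int) < 0) := by norm_num
  have hd : ∀ a : Nat, List.take (s.length - a) (List.drop a s) = List.drop a s :=
    fun a => List.take_of_length_le (by simp)
  simp only [h10, if_false, List.drop_zero, Nat.sub_zero, hd]
  split_ifs with h1 h2
  · have hm : max (p + (s.length : Int)) 0 = 0 := by omega
    simp [hm]
  · have hm : (max (p + (s.length : Int)) 0).toNat = ((s.length : Int) + p).toNat := by omega
    simp [hm]
  · have hm : (min p (s.length : Int)).toNat = min p.toNat s.length := by omega
    simp [hm]

-- structural mirror of splitOn · [','] : prepend p to the first piece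
def pvCons1 (p : List Char) : List (List Char) → List (List Char)
  | [] => [p]
  | f :: t => (p ++ f) :: t

def pvSplitC : List Char → List (List Char)
  | [] => [[]]
  | c :: r => if c = ',' then [] :: pvSplitC r else pvCons1 [c] (pvSplitC r)

lemma pvSplitC_ne_nil (l : List Char) : pvSplitC l ≠ [] := by
  cases l with
  | nil => simp [pvSplitC]
  | cons c r =>
    simp only [pvSplitC]
    split_ifs
    · simp
    · cases h : pvSplitC r <;> simp [pvCons1]

lemma splitOn_go_eq : ∀ (l : List Char) (fuel : Nat) (cur : List Char) (acc : List (List Char)),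
    l.length ≤ fuel →
    PySem.Chars.splitOn.go [','] fuel l cur acc = acc.reverse ++ pvCons1 cur.reverse (pvSplitC l) := by
  intro l
  induction l with
  | nil =>
    intro fuel cur acc h
    cases fuel <;> simp [PySem.Chars.splitOn.go, pvSplitC, pvCons1]
  | cons c r ih =>
    intro fuel cur acc h
    cases fuel with
    | zero => simp at h
    | succ f =>
      by_cases hc : c = ','
      · subst hc
        have hpre : [','].isPrefixOf (',' :: r) = true := by simp [List.isPrefixOf]
        simp only [PySem.Chars.splitOn.go, hpre, if_true, List.length_cons, List.length_nil,
          List.drop_succ_cons, List.drop_zero]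
        rw [ih f [] (cur.reverse :: acc) (by simpa using h)]
        have hne := pvSplitC_ne_nil r
        cases hs : pvSplitC r with
        | nil => exact absurd hs hne
        | cons a b => simp [pvSplitC, pvCons1, hs]
      · have hpre : [','].isPrefixOf (c :: r) = false := by
          simp [List.isPrefixOf]
          exact fun hx => absurd hx.symm hc
        simp only [PySem.Chars.splitOn.go, hpre]
        rw [ih f (c :: cur) acc (by simpa using h)]
        have hne := pvSplitC_ne_nil r
        cases hs : pvSplitC r with
        | nil => exact absurd hs hne
        | cons a b => simp [pvSplitC, hc, pvCons1, hs]

lemma splitOn_comma (l : List Char) : PySem.Chars.splitOn l [','] = pvSplitC l := by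
  unfold PySem.Chars.splitOn
  rw [splitOn_go_eq l (l.length + 1) [] [] (by omega)]
  have hne := pvSplitC_ne_nil l
  cases hs : pvSplitC l with
  | nil => exact absurd hs hne
  | cons a b => simp [pvCons1]

-- structural mirror of split₀ (cur = current word, reversed)
def pvP (cur : List Char) : List Char → List (List Char)
  | [] => if cur.isEmpty then [] else [cur.reverse]
  | c :: g => if PySem.Chars.isspace c then
      (if cur.isEmpty then pvP [] g else cur.reverse :: pvP ([] : List Char) g)
    else pvP (c :: cur) g

lemma split₀_go_eq : ∀ (l cur : List Char) (acc : List (List Char)),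
    PySem.Chars.split₀.go l cur acc = acc.reverse ++ pvP cur l := by
  intro l
  induction l with
  | nil => intro cur acc; by_cases h : cur.isEmpty <;> simp [PySem.Chars.split₀.go, pvP, h]
  | cons c r ih =>
    intro cur acc
    by_cases hs : PySem.Chars.isspace c
    · by_cases h : cur.isEmpty
      · simp only [PySem.Chars.split₀.go, hs, h, if_true]
        rw [ih [] acc]
        simp [pvP, hs, h]
      · simp only [PySem.Chars.split₀.go, hs, h, if_true, if_false, Bool.false_eq_true]
        rw [ih [] (cur.reverse :: acc)]
        simp [pvP, hs, h]
    · simp only [PySem.Chars.split₀.go, hs, Bool.false_eq_true, if_false]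
      rw [ih (c :: cur) acc]
      simp [pvP, hs]

lemma split₀_eq_pvP (l : List Char) : PySem.Chars.split₀ l = pvP [] l := by
  unfold PySem.Chars.split₀
  rw [split₀_go_eq]
  simp

-- the per-field normalizer as B's machine computes it, parametrized by the field state
def pvNorm (st pd : Bool) : List Char → List Char
  | [] => []
  | c :: g => if PySem.Chars.isspace c then pvNorm st (pd || st) g
              else (if pd then [' '] else []) ++ c :: pvNorm true false g

lemma pvP_ne_nil : ∀ (g cur : List Char), cur ≠ [] → pvP cur g ≠ [] := by
  intro g
  induction g with
  | nil => intro cur h; simp [pvP, List.isEmpty_iff, h]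
  | cons c g ih =>
    intro cur h
    by_cases hs : PySem.Chars.isspace c
    · simp [pvP, hs, List.isEmpty_iff, h]
    · simpa [pvP, hs] using ih (c :: cur) (by simp)

-- in the (started, pending) state the machine emits a leading ' ' iff another word follows
lemma pvNorm_tt : ∀ g : List Char,
    pvNorm true true g = if pvP [] g = [] then [] else ' ' :: pvNorm false false g := by
  intro g
  induction g with
  | nil => simp [pvNorm, pvP]
  | cons c g ih =>
    by_cases hs : PySem.Chars.isspace c
    · simpa [pvNorm, pvP, hs] using ih
    · simp [pvNorm, pvP, hs, pvP_ne_nil g [c] (by simp)]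

-- " ".join(e.split()) IS the machine's per-field normalizer
lemma pvP_join : ∀ g : List Char,
    (∀ cur : List Char, cur ≠ [] →
      PySem.Chars.join [' '] (pvP cur g) = cur.reverse ++ pvNorm true false g) ∧
    PySem.Chars.join [' '] (pvP [] g) = pvNorm false false g := by
  intro g
  induction g with
  | nil =>
    constructor
    · intro cur h
      simp [pvP, List.isEmpty_iff, h, pvNorm, PySem.Chars.join_singleton]
    · simp [pvP, pvNorm, PySem.Chars.join_nil]
  | cons c g ih =>
    constructor
    · intro cur h
      by_cases hs : PySem.Chars.isspace c
      · simp only [pvP, hs, if_true, List.isEmpty_iff, h, if_false]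
        rw [pvNorm]
        simp only [hs, if_true, Bool.false_or]
        rw [pvNorm_tt]
        cases hp : pvP ([] : List Char) g with
        | nil => simp [PySem.Chars.join_singleton]
        | cons a b =>
          rw [PySem.Chars.join_cons_cons, ← hp, ih.2]
          simp [hp]
      · simp only [pvP, hs, Bool.false_eq_true, if_false]
        rw [ih.1 (c :: cur) (by simp), pvNorm]
        simp [hs]
    · by_cases hs : PySem.Chars.isspace c
      · simp only [pvP, hs, if_true, List.isEmpty_nil]
        rw [ih.2, pvNorm]
        simp [hs]
      · simp only [pvP, hs, Bool.false_eq_true, if_false]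
        rw [ih.1 [c] (by simp), pvNorm]
        simp [hs]

-- B's whole machine written as structural recursion
def pvE (st pd : Bool) : List Char → List Char
  | [] => []
  | c :: r => if c = ',' then ',' :: pvE false false r
              else if PySem.Chars.isspace c then pvE st (pd || st) r
              else (if pd then [' '] else []) ++ c :: pvE true false r

lemma pvFold_eq_pvE : ∀ (l : List Char) (out : List Char) (st pd : Bool),
    (l.foldl pvBStep (out, st, pd)).1 = out ++ pvE st pd l := by
  intro l
  induction l with
  | nil => intro out st pd; simp [pvE]
  | cons c r ih =>
    intro out st pd
    by_cases hc : c = ','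
    · subst hc
      rw [List.foldl_cons]
      show (r.foldl pvBStep (pvBStep (out, st, pd) ',')).1 = _
      simp only [pvBStep]
      rw [ih]
      simp [pvE]
    · by_cases hs : PySem.Chars.isspace c
      · rw [List.foldl_cons]
        show (r.foldl pvBStep (pvBStep (out, st, pd) c)).1 = _
        simp only [pvBStep, hc, if_false, hs, if_true]
        rw [ih]
        simp [pvE, hc, hs]
      · rw [List.foldl_cons]
        show (r.foldl pvBStep (pvBStep (out, st, pd) c)).1 = _
        simp only [pvBStep, hc, if_false, hs, Bool.false_eq_true]
        rw [ih]
        cases pd <;> simp [pvE, hc, hs]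

-- the machine's output over the whole string = the per-field normalizers of its pieces
lemma pvE_fields : ∀ (l : List Char) (st pd : Bool) (f : List Char) (t : List (List Char)),
    pvSplitC l = f :: t →
    pvE st pd l ++ [','] =
      pvNorm st pd f ++ [','] ++ t.flatMap (fun e => pvNorm false false e ++ [',']) := by
  intro l
  induction l with
  | nil =>
    intro st pd f t h
    simp only [pvSplitC] at h
    cases h
    simp [pvE, pvNorm]
  | cons c r ih =>
    intro st pd f t h
    obtain ⟨f', t', hr⟩ : ∃ f' t', pvSplitC r = f' :: t' := by
      cases hs : pvSplitC r with
      | nil => exact absurd hs (pvSplitC_ne_nil r)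
      | cons a b => exact ⟨a, b, rfl⟩
    by_cases hc : c = ','
    · subst hc
      simp only [pvSplitC, ite_true, hr] at h
      rw [List.cons.injEq] at h
      obtain ⟨hf, ht⟩ := h
      subst hf; subst ht
      rw [pvE]
      simp only [List.cons_append, pvNorm, List.nil_append, ite_true]
      rw [ih false false f' t' hr]
      simp
    · simp only [pvSplitC, hc, if_false, hr, pvCons1, List.singleton_append] at h
      rw [List.cons.injEq] at h
      obtain ⟨hf, ht⟩ := h
      subst hf; subst ht
      by_cases hs : PySem.Chars.isspace c
      · rw [pvE, pvNorm]
        simp only [hc, if_false, hs, if_true]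
        exact ih st (pd || st) f' t' hr
      · rw [pvE, pvNorm]
        simp only [hc, if_false, hs, Bool.false_eq_true]
        rw [List.append_assoc, List.append_assoc, List.cons_append,
            ih true false f' t' hr]
        simp

-- ===== VERDICT (by name: the statement is the Claim_ definition above) =====
theorem toCSVLine_spec : Claim_equal_toCSVLine := by
  intro el pos _
  show toCSVLine el pos = toCSVLine_alt el pos
  show String.mk (pvNormJoin (PySem.Chars.splitOn (pos.foldl pvAStep el.toList) [','])) =
    String.mk ((List.foldl pvBStep ([], false, false)
      (pos.foldl (fun s p => PySem.List.insert s p ',') el.toList)).1 ++ [','])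
  rw [PySem.List.foldl_congr_mem pos pvAStep (fun s p => PySem.List.insert s p ',') el.toList
        (fun acc x _ => pvAStep_eq_insert acc x)]
  set l := pos.foldl (fun s p => PySem.List.insert s p ',') el.toList with hl
  rw [pvFold_eq_pvE, List.nil_append]
  congr 1
  have hfn : (fun (acc : List Char) e =>
      acc ++ PySem.Chars.join [' '] (PySem.Chars.split₀ e) ++ [',']) =
      fun (acc : List Char) e => acc ++ (pvNorm false false e ++ [',']) := by
    funext acc e
    rw [split₀_eq_pvP, (pvP_join e).2, List.append_assoc]
  rw [pvNormJoin, hfn, PySem.List.foldl_append_eq_flatMap, splitOn_comma]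
  obtain ⟨f, t, hs⟩ : ∃ f t, pvSplitC l = f :: t := by
    cases hx : pvSplitC l with
    | nil => exact absurd hx (pvSplitC_ne_nil l)
    | cons a b => exact ⟨a, b, rfl⟩
  rw [hs, pvE_fields l false false f t hs]
  simp
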